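-- pv_equiv track=rewrite | github.com/OCP-69/LFL_Financial-Projections | scripts/compute_model.py | generate_customer_plan
-- ===== SOURCE A (Python) =====
-- KUNDE_SCALE = {
--     'gering': (1.0, 1.0, 1.0),   # (SME, Mid, Enterprise)
--     'normal': (2.0, 2.0, 1.5),
--     'stark':  (4.5, 4.5, 2.5),
-- }
--
-- START_SHIFT = {
--     'gering': 0,
--     'normal': -1,   # M8 statt M7 = 1 Monat später, aber mehr Kunden
--     'stark':  2,    # 2 Monate früher (M5 statt M7)
-- }
--
-- def generate_customer_plan(szenario: str, base_sme, base_mid, base_ent) -> tuple: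
--     """
--     Generiert einen 52-Monats-Kundenplan für das gewünschte Szenario.
--     Basiert auf dem gering-Plan, skaliert und zeitlich verschoben.
--     """
--     if szenario == 'gering':
--         return list(base_sme), list(base_mid), list(base_ent)
--
--     scale_sme, scale_mid, scale_ent = KUNDE_SCALE[szenario]
--     shift = START_SHIFT[szenario]   # + = früher, - = später
--
--     N = 52
--     new_sme = [0] * N
--     new_mid = [0] * N
--     new_ent = [0] * N
--
--     for i in range(N):
--         j = i - shift   # Quellmonat im gering-Plan
--         if 0 <= j < N:
--             new_sme[i] = round(base_sme[j] * scale_sme)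
--             new_mid[i] = round(base_mid[j] * scale_mid)
--             new_ent[i] = round(base_ent[j] * scale_ent)
--
--     return new_sme, new_mid, new_ent
-- ===== SOURCE B (Python) =====
-- KUNDE_SCALE = {
--     'gering': (1.0, 1.0, 1.0),
--     'normal': (2.0, 2.0, 1.5),
--     'stark':  (4.5, 4.5, 2.5),
-- }
--
-- START_SHIFT = {
--     'gering': 0,
--     'normal': -1,
--     'stark':  2,
-- }
--
-- N_MONTHS = 52
--
--
-- def _scaled_shifted(base, scale, shift):
--     """Scale the whole plan, then time-shift it by whole-list slicing."""
--     scaled = [round(v * scale) for v in base]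
--     if shift >= 0:
--         out = [0] * shift + scaled[:N_MONTHS - shift]
--     else:
--         out = scaled[-shift:N_MONTHS]
--     return out + [0] * (N_MONTHS - len(out))
--
--
-- def generate_customer_plan(szenario: str, base_sme, base_mid, base_ent) -> tuple:
--     if szenario == 'gering':
--         return list(base_sme), list(base_mid), list(base_ent)
--     s_sme, s_mid, s_ent = KUNDE_SCALE[szenario]
--     shift = START_SHIFT[szenario]
--     return (_scaled_shifted(base_sme, s_sme, shift),
--             _scaled_shifted(base_mid, s_mid, shift),
--             _scaled_shifted(base_ent, s_ent, shift))
-- ===== Notes on version B (the rewrite author's own statement) =====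
-- stated objective: idiomatic
-- what changed: A's single fused per-index loop with bounds checks is replaced by a per-list decomposition: scale the whole plan with a comprehension, then time-shift it by whole-list slicing and zero-padding.
import Mathlib
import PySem

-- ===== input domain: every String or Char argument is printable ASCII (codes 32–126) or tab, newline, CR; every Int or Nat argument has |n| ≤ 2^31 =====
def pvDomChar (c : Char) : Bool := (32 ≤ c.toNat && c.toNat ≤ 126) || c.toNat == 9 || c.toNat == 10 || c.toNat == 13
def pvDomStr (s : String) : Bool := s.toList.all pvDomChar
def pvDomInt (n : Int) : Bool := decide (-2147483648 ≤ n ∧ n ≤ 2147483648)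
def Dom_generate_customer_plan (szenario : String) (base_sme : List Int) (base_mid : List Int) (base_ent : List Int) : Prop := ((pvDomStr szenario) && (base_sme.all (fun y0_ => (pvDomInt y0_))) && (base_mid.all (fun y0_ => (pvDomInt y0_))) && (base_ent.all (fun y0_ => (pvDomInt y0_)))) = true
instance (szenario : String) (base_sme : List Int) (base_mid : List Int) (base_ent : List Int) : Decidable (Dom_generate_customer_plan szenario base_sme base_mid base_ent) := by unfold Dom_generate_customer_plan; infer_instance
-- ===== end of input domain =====

-- B replaces A's fused bounds-checked per-index loop by "scale with a map, then shift by slicing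
-- and zero-padding" (idiomatic decomposition; same cost).


-- ===== PORT A =====
-- round(v * scale) for the scales 1.5/2.0/2.5/4.5 occurring here: every scale is k/2 with k an
-- integer, the double products are exact on Dom (|v| ≤ 2^31 so |k*v| < 2^53), and Python's round
-- is half-to-even; so round(v * (k/2)) is EXACTLY this integer computation on Dom.
def pyRoundHalf (n : Int) : Int :=
  let q := PySem.Int.floordiv n 2
  if PySem.Int.mod n 2 = 0 then q
  else if PySem.Int.mod q 2 = 0 then q else q + 1

-- one assignment 'new[i] = round(base[j] * scale)' of A's loop body (scale = k/2)
def stepA (shift k : Int) (base : List Int) (acc : List Int) (i : Int) : List Int :=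
  if 0 ≤ i - shift ∧ i - shift < 52
  then acc.set i.toNat (pyRoundHalf (k * PySem.List.pyGetD base (i - shift) 0)) else acc

def generate_customer_plan (szenario : String) (base_sme : List Int) (base_mid : List Int) (base_ent : List Int) : List Int × List Int × List Int :=
  if szenario == "gering" then (base_sme, base_mid, base_ent)
  else
    -- KUNDE_SCALE[szenario], scales stored as 2*scale (all scales are halves of integers);
    -- Pre_ restricts szenario to the dict's keys (otherwise Python raises KeyError)
    let sc : Int × Int × Int := if szenario == "normal" then (4, 4, 3) else (9, 9, 5)
    let shift : Int := if szenario == "normal" then -1 else 2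
    (PySem.List.pyRange 0 52 1).foldl
      (fun (st : List Int × List Int × List Int) i =>
        (stepA shift sc.1 base_sme st.1 i,
         stepA shift sc.2.1 base_mid st.2.1 i,
         stepA shift sc.2.2 base_ent st.2.2 i))
      (List.replicate 52 0, List.replicate 52 0, List.replicate 52 0)

-- ===== PORT B =====
-- scaled = [round(v * scale) for v in base]   (scale = k/2, exact as above)
def scaleList (k : Int) (base : List Int) : List Int :=
  base.map (fun v => pyRoundHalf (k * v))

-- place the scaled plan by slicing, then zero-pad to 52
def padTo52 (out : List Int) : List Int := out ++ List.replicate (52 - out.length) 0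

def placeB (shift : Int) (scaled : List Int) : List Int :=
  padTo52 (if 0 ≤ shift
    then List.replicate shift.toNat 0 ++ PySem.List.slice scaled none (some (52 - shift))
    else PySem.List.slice scaled (some (-shift)) (some 52))

def generate_customer_plan_alt (szenario : String) (base_sme : List Int) (base_mid : List Int) (base_ent : List Int) : List Int × List Int × List Int :=
  if szenario == "gering" then (base_sme, base_mid, base_ent)
  else
    let sc : Int × Int × Int := if szenario == "normal" then (4, 4, 3) else (9, 9, 5)
    let shift : Int := if szenario == "normal" then -1 else 2
    (placeB shift (scaleList sc.1 base_sme),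
     placeB shift (scaleList sc.2.1 base_mid),
     placeB shift (scaleList sc.2.2 base_ent))

-- ===== PRECONDITION & SPEC =====
-- Exactly the inputs on which Python A returns: szenario must be a key of KUNDE_SCALE/START_SHIFT
-- (otherwise KeyError), and for 'normal' (shift -1) A indexes base[1..51] so all three lists need
-- length ≥ 52, for 'stark' (shift 2) it indexes base[0..49] so length ≥ 50 (otherwise IndexError).
def Pre_generate_customer_plan (szenario : String) (base_sme : List Int) (base_mid : List Int) (base_ent : List Int) : Prop :=
  szenario = "gering" ∨
  (szenario = "normal" ∧ 52 ≤ base_sme.length ∧ 52 ≤ base_mid.length ∧ 52 ≤ base_ent.length) ∨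
  (szenario = "stark" ∧ 50 ≤ base_sme.length ∧ 50 ≤ base_mid.length ∧ 50 ≤ base_ent.length)

instance (szenario : String) (base_sme : List Int) (base_mid : List Int) (base_ent : List Int) : Decidable (Pre_generate_customer_plan szenario base_sme base_mid base_ent) := by unfold Pre_generate_customer_plan; infer_instance

def pvWitness_generate_customer_plan : String × List Int × List Int × List Int := ("gering", [3, 5], [1], [])

def Spec_generate_customer_plan (szenario : String) (base_sme : List Int) (base_mid : List Int) (base_ent : List Int) (out : List Int × List Int × List Int) : Prop := out = generate_customer_plan_alt szenario base_sme base_mid base_ent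
instance (szenario : String) (base_sme : List Int) (base_mid : List Int) (base_ent : List Int) (out : List Int × List Int × List Int) : Decidable (Spec_generate_customer_plan szenario base_sme base_mid base_ent out) := by unfold Spec_generate_customer_plan; infer_instance

-- ===== CLAIM (what is proved, stated in full; the proofs are below) =====
def Claim_equal_generate_customer_plan : Prop := ∀ (szenario : String) (base_sme : List Int) (base_mid : List Int) (base_ent : List Int), Dom_generate_customer_plan szenario base_sme base_mid base_ent → Pre_generate_customer_plan szenario base_sme base_mid base_ent → Spec_generate_customer_plan szenario base_sme base_mid base_ent (generate_customer_plan szenario base_sme base_mid base_ent)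

-- ===== LEMMAS AND PROOFS =====

theorem length_foldl_stepA (shift k : Int) (base : List Int) (L : List Int) (acc : List Int) :
    (L.foldl (stepA shift k base) acc).length = acc.length := by
  induction L generalizing acc with
  | nil => rfl
  | cons b L ih =>
      simp only [List.foldl_cons, ih]
      unfold stepA
      split <;> simp

theorem foldl_stepA_get? (shift k : Int) (base : List Int) (i : Nat) (L : List Int) (acc : List Int)
    (hL0 : ∀ b ∈ L, 0 ≤ b) (hnd : L.Nodup) (hi : i < acc.length) :
    (L.foldl (stepA shift k base) acc)[i]? =
      if (i : Int) ∈ L ∧ 0 ≤ (i : Int) - shift ∧ (i : Int) - shift < 52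
      then some (pyRoundHalf (k * PySem.List.pyGetD base ((i : Int) - shift) 0))
      else acc[i]? := by
  induction L generalizing acc with
  | nil => simp
  | cons b L ih =>
      simp only [List.foldl_cons]
      have hb0 : 0 ≤ b := hL0 b (by simp)
      have hlen' : i < (stepA shift k base acc b).length := by
        unfold stepA; split <;> simpa using hi
      rw [ih (stepA shift k base acc b) (fun x hx => hL0 x (by simp [hx])) hnd.of_cons hlen']
      by_cases hib : (i : Int) = b
      · have hiL : (i : Int) ∉ L := by
          intro h; exact (List.nodup_cons.mp hnd).1 (hib ▸ h)
        have hbt : b.toNat = i := by omega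
        unfold stepA
        simp only [hib, List.mem_cons, true_or]
        by_cases hc : 0 ≤ b - shift ∧ b - shift < 52
        · simp only [hc, if_true, true_and, hbt]
          rw [List.getElem?_set_self (by simpa using hi)]
          simp
        · simp only [hc, if_false]
          simp
      · have hset : (stepA shift k base acc b)[i]? = acc[i]? := by
          unfold stepA
          split
          · rw [List.getElem?_set_ne (by omega)]
          · rfl
        rw [hset]
        simp [hib]

-- B-side: the two concrete shifts
theorem placeB_neg_one (scaled : List Int) (h : 52 ≤ scaled.length) :
    placeB (-1) scaled = (scaled.drop 1).take 51 ++ [0] := by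
  unfold placeB
  rw [if_neg (by norm_num : ¬ (0 ≤ (-1 : Int)))]
  have hs : PySem.List.slice scaled (some (-(-1 : Int))) (some 52) = (scaled.drop 1).take 51 := by
    rw [PySem.List.slice_toNat scaled (by norm_num) (by norm_num)]
    rfl
  rw [hs]
  unfold padTo52
  have hlen : ((scaled.drop 1).take 51).length = 51 := by
    simp [List.length_take]; omega
  rw [hlen]
  rfl

theorem placeB_two (scaled : List Int) (h : 50 ≤ scaled.length) :
    placeB 2 scaled = [0, 0] ++ scaled.take 50 := by
  unfold placeB
  rw [if_pos (by norm_num : (0:Int) ≤ 2)]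
  have hs : PySem.List.slice scaled none (some ((52 : Int) - 2)) = scaled.take 50 := by
    rw [show (52 : Int) - 2 = 50 by norm_num, PySem.List.slice_to scaled (by norm_num)]
    rfl
  rw [hs]
  unfold padTo52
  have hrep : List.replicate (2 : Int).toNat (0 : Int) = [0, 0] := rfl
  rw [hrep]
  have hlen : (([0, 0] : List Int) ++ scaled.take 50).length = 52 := by
    simp [List.length_take]; omega
  rw [hlen]
  simp

-- componentwise split of A's single fused loop over the triple state
theorem foldl_triple (L : List Int) (f1 f2 f3 : List Int → Int → List Int) (a b c : List Int) :
    L.foldl (fun st k => (f1 st.1 k, f2 st.2.1 k, f3 st.2.2 k)) (a, b, c)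
    = (L.foldl f1 a, L.foldl f2 b, L.foldl f3 c) := by
  induction L generalizing a b c with
  | nil => rfl
  | cons x L ih => simp [List.foldl_cons, ih]

theorem loop_neg_one (k : Int) (base : List Int) (h : 52 ≤ base.length) :
    (PySem.List.pyRange 0 52 1).foldl (stepA (-1) k base) (List.replicate 52 0)
      = placeB (-1) (scaleList k base) := by
  have hsl : (scaleList k base).length = base.length := by simp [scaleList]
  rw [placeB_neg_one _ (by omega)]
  apply List.ext_getElem?
  intro i
  by_cases hi : i < 52
  · rw [foldl_stepA_get? (-1) k base i _ _
      (fun b hb => (PySem.List.mem_pyRange_one.mp hb).1)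
      (PySem.List.nodup_pyRange_one 0 52) (by simpa using hi)]
    have hmem : (i : Int) ∈ PySem.List.pyRange 0 52 1 := by
      rw [PySem.List.mem_pyRange_one]; omega
    by_cases h51 : i < 51
    · have hc : 0 ≤ (i : Int) - (-1) ∧ (i : Int) - (-1) < 52 := by omega
      rw [if_pos ⟨hmem, hc⟩]
      have hcast : (i : Int) - (-1) = ((i + 1 : Nat) : Int) := by push_cast; ring
      rw [hcast, PySem.List.pyGetD_natCast, List.getD_eq_getElem?_getD,
        List.getElem?_eq_getElem (by omega)]
      have hlen51 : (((scaleList k base).drop 1).take 51).length = 51 := by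
        simp [hsl]; omega
      rw [List.getElem?_append_left (by rw [hlen51]; omega)]
      simp [scaleList, h51]
      exact ⟨_, List.getElem?_eq_getElem (by omega), rfl⟩
    · have h51' : i = 51 := by omega
      rw [if_neg (by omega)]
      subst h51'
      have hlen51 : (((scaleList k base).drop 1).take 51).length = 51 := by
        simp [hsl]; omega
      rw [List.getElem?_append_right (by rw [hlen51])]
      rw [hlen51]
      rfl
  · rw [List.getElem?_eq_none (by rw [length_foldl_stepA]; simp; omega),
      List.getElem?_eq_none (by simp [hsl]; omega)]

theorem loop_two (k : Int) (base : List Int) (h : 50 ≤ base.length) :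
    (PySem.List.pyRange 0 52 1).foldl (stepA 2 k base) (List.replicate 52 0)
      = placeB 2 (scaleList k base) := by
  have hsl : (scaleList k base).length = base.length := by simp [scaleList]
  rw [placeB_two _ (by omega)]
  apply List.ext_getElem?
  intro i
  by_cases hi : i < 52
  · rw [foldl_stepA_get? 2 k base i _ _
      (fun b hb => (PySem.List.mem_pyRange_one.mp hb).1)
      (PySem.List.nodup_pyRange_one 0 52) (by simpa using hi)]
    have hmem : (i : Int) ∈ PySem.List.pyRange 0 52 1 := by
      rw [PySem.List.mem_pyRange_one]; omega
    by_cases h2 : 2 ≤ i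
    · have hc : 0 ≤ (i : Int) - 2 ∧ (i : Int) - 2 < 52 := by omega
      rw [if_pos ⟨hmem, hc⟩]
      have hcast : (i : Int) - 2 = ((i - 2 : Nat) : Int) := by omega
      rw [hcast, PySem.List.pyGetD_natCast, List.getD_eq_getElem?_getD,
        List.getElem?_eq_getElem (by omega)]
      rw [List.getElem?_append_right (by simp; omega)]
      simp [scaleList, show i - 2 < 50 by omega]
      exact ⟨_, List.getElem?_eq_getElem (by omega), rfl⟩
    · rw [if_neg (by omega)]
      rw [List.getElem?_append_left (by simp; omega)]
      interval_cases i <;> simp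
  · rw [List.getElem?_eq_none (by rw [length_foldl_stepA]; simp; omega),
      List.getElem?_eq_none (by simp [hsl]; omega)]

-- ===== VERDICT (by name: the statement is the Claim_ definition above) =====
theorem generate_customer_plan_spec : Claim_equal_generate_customer_plan := by
  intro sz bs bm be _ hpre
  unfold Spec_generate_customer_plan
  rcases hpre with h | ⟨h, h1, h2, h3⟩ | ⟨h, h1, h2, h3⟩
  · subst h
    simp [generate_customer_plan, generate_customer_plan_alt]
  · subst h
    have hb : (("normal" : String) == "gering") = false := by simp
    have hn : (("normal" : String) == "normal") = true := by simp
    simp only [generate_customer_plan, generate_customer_plan_alt, hb, hn,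
      Bool.false_eq_true, if_false, if_true]
    rw [foldl_triple]
    rw [loop_neg_one 4 bs h1, loop_neg_one 4 bm h2, loop_neg_one 3 be h3]
  · subst h
    have hb : (("stark" : String) == "gering") = false := by simp
    have hn : (("stark" : String) == "normal") = false := by simp
    simp only [generate_customer_plan, generate_customer_plan_alt, hb, hn,
      Bool.false_eq_true, if_false]
    rw [foldl_triple]
    rw [loop_two 9 bs h1, loop_two 9 bm h2, loop_two 5 be h3]
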